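-- pv_equiv track=rewrite | github.com/herreraflavio/uc_merced_campus_event_api_backend | routes/ask_backup_2.py | join_with_limit
-- ===== SOURCE A (Python) =====
-- def join_with_limit(parts, max_chars):
--     out = []
--     total = 0
--     for part in parts:
--         if not part:
--             continue
--         add_len = len(part) if not out else len(part) + 5
--         if total + add_len > max_chars:
--             break
--         out.append(part)
--         total += add_len
--     return " ### ".join(out)
-- ===== SOURCE B (Python) =====
-- def join_with_limit(parts, max_chars):
--     kept = [p for p in parts if p]
--     # prefix[k] - 5 == len(" ### ".join(kept[:k+1]))
--     prefix = []
--     total = 0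
--     for p in kept:
--         total += len(p) + 5
--         prefix.append(total)
--     k = 0
--     while k < len(kept) and prefix[k] - 5 <= max_chars:
--         k += 1
--     return " ### ".join(kept[:k])
-- ===== Notes on version B (the rewrite author's own statement) =====
-- stated objective: alternative
-- what changed: B replaces A's single break-loop threading a running total with a filter of falsy parts, a prefix-sum pass over their lengths, and a scan for the longest prefix whose joined length fits, then joins that prefix.
import Mathlib
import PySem

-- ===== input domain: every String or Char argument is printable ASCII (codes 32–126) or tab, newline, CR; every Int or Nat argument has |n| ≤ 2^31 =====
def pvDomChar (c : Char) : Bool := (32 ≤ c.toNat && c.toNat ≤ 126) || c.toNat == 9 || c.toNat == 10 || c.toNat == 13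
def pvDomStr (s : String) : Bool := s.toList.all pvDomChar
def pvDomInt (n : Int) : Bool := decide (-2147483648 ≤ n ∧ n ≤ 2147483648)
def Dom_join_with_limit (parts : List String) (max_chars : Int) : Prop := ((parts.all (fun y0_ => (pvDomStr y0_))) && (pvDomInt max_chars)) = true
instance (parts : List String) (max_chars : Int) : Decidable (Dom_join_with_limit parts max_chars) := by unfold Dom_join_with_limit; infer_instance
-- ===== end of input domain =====

-- B replaces A's single break-loop with running total by a filter, a prefix-sum pass
-- and a scan for the longest fitting prefix, then joins that prefix (objective: simpler).

-- ===== PORT A =====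
-- the for-loop of A: state (out, total); 'continue' on empty part, 'break' when the limit is exceeded
def joinA_go (max_chars : Int) : List String → List String → Int → List String
  | [], out, _ => out
  | p :: rest, out, total =>
    if p = "" then joinA_go max_chars rest out total
    else
      let addLen : Int := if out = [] then PySem.Str.len p else PySem.Str.len p + 5
      if total + addLen > max_chars then out
      else joinA_go max_chars rest (out ++ [p]) (total + addLen)

def join_with_limit (parts : List String) (max_chars : Int) : String :=
  PySem.Str.join " ### " (joinA_go max_chars parts [] 0)

-- ===== PORT B =====
-- B's prefix-building for-loop: prefix[k] - 5 = len(" ### ".join(kept[:k+1]))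
def goPre : List String → Int → List Int → List Int
  | [], _, acc => acc
  | p :: r, total, acc => goPre r (total + PySem.Str.len p + 5) (acc ++ [total + PySem.Str.len p + 5])

-- B's while-loop; the k < n guard keeps Python's prefix[k] in range, so getD is exact
def goK (n : Nat) (pre : List Int) (max_chars : Int) (k : Nat) : Nat :=
  if k < n ∧ pre.getD k 0 - 5 ≤ max_chars then goK n pre max_chars (k + 1) else k
termination_by n - k
decreasing_by omega

def join_with_limit_alt (parts : List String) (max_chars : Int) : String :=
  let kept := parts.filter (fun p => p ≠ "")
  PySem.Str.join " ### " (kept.take (goK kept.length (goPre kept 0 []) max_chars 0))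

-- ===== PRECONDITION & SPEC =====
def Spec_join_with_limit (parts : List String) (max_chars : Int) (out : String) : Prop := out = join_with_limit_alt parts max_chars
instance (parts : List String) (max_chars : Int) (out : String) : Decidable (Spec_join_with_limit parts max_chars out) := by unfold Spec_join_with_limit; infer_instance

-- ===== CLAIM (what is proved, stated in full; the proofs are below) =====
def Claim_equal_join_with_limit : Prop := ∀ (parts : List String) (max_chars : Int), Dom_join_with_limit parts max_chars → Spec_join_with_limit parts max_chars (join_with_limit parts max_chars)

-- ===== LEMMAS AND PROOFS =====

-- length of the " ### "-join of a list of parts: this is A's running total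
def jlen (xs : List String) : Int := PySem.Str.len (PySem.Str.join " ### " xs)

-- sum of (len p + 5) over a list: the quantity B's prefix sums accumulate
def S (l : List String) : Int := (l.map (fun p => PySem.Str.len p + 5)).sum

-- the pure prefix-sum list goPre produces past its accumulator
def psums : List String → Int → List Int
  | [], _ => []
  | p :: r, t => (t + PySem.Str.len p + 5) :: psums r (t + PySem.Str.len p + 5)

theorem goPre_eq (l : List String) : ∀ (t : Int) (acc : List Int), goPre l t acc = acc ++ psums l t := by
  induction l with
  | nil => intro t acc; simp [goPre, psums]
  | cons p r ih => intro t acc; simp [goPre, psums, ih]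

theorem psums_getD (l : List String) : ∀ (t : Int) (k : Nat), k < l.length →
    (psums l t).getD k 0 = t + S (l.take (k + 1)) := by
  induction l with
  | nil => intro t k h; simp at h
  | cons p r ih =>
    intro t k h
    cases k with
    | zero => simp [psums, S]; ring
    | succ k =>
      simp only [psums, List.getD_cons_succ, List.take_succ_cons, S, List.map_cons, List.sum_cons]
      rw [ih _ k (by simpa using h)]
      simp [S]; ring

theorem jlen_nil : jlen [] = 0 := by
  simp [jlen, PySem.Str.len_eq, PySem.Str.toList_join, PySem.Chars.join_nil]

theorem jlen_singleton (p : String) : jlen [p] = PySem.Str.len p := by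
  simp [jlen, PySem.Str.len_eq, PySem.Str.toList_join, PySem.Chars.join_singleton]

theorem jlen_cons_cons (p q : String) (r : List String) :
    jlen (p :: q :: r) = PySem.Str.len p + 5 + jlen (q :: r) := by
  have hsep : (" ### ".toList) = [' ', '#', '#', '#', ' '] := by decide
  simp only [jlen, PySem.Str.len_eq, PySem.Str.toList_join, List.map_cons, hsep,
    PySem.Chars.join_cons_cons, List.length_append, List.length_cons, List.length_nil]
  push_cast
  omega

theorem jlen_eq_S (l : List String) (h : l ≠ []) : jlen l = S l - 5 := by
  induction l with
  | nil => exact absurd rfl h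
  | cons p r ih =>
    cases r with
    | nil => simp [jlen_singleton, S]
    | cons q u =>
      rw [jlen_cons_cons, ih (by simp)]
      simp [S]; ring

theorem jlen_append_singleton (out : List String) (p : String) :
    jlen (out ++ [p]) =
      jlen out + (if out = [] then PySem.Str.len p else PySem.Str.len p + 5) := by
  by_cases h : out = []
  · subst h; simp [jlen_nil, jlen_singleton]
  · rw [if_neg h, jlen_eq_S _ (by simp), jlen_eq_S _ h]
    simp [S]; ring

-- A skips empty parts exactly as B's filter removes them
theorem joinA_filter (m : Int) (l : List String) : ∀ (out : List String) (t : Int),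
    joinA_go m l out t = joinA_go m (l.filter (fun p => decide (p ≠ ""))) out t := by
  induction l with
  | nil => intro out t; simp [joinA_go]
  | cons p r ih =>
    intro out t
    by_cases hp : p = ""
    · subst hp; simp [joinA_go, List.filter, ih]
    · have hf : List.filter (fun q => decide (q ≠ "")) (p :: r)
          = p :: List.filter (fun q => decide (q ≠ "")) r := by simp [hp]
      simp only [joinA_go, if_neg hp, hf]
      split_ifs <;> first | rfl | exact ih _ _

-- main alignment: A's loop over the suffix from k equals taking goK's stopping point
theorem main_align (m : Int) (full : List String)
    (hne : ∀ p ∈ full, p ≠ "") (d : Nat) : ∀ (k : Nat),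
    full.length - k = d → k ≤ full.length →
    joinA_go m (full.drop k) (full.take k) (jlen (full.take k))
      = full.take (goK full.length (psums full 0) m k) := by
  induction d with
  | zero =>
    intro k hd hk
    have hkn : k = full.length := by omega
    subst hkn
    rw [goK]
    simp [joinA_go, List.drop_length]
  | succ d ih =>
    intro k hd hk
    have hklt : k < full.length := by omega
    have hdrop : full.drop k = full[k] :: full.drop (k + 1) := List.drop_eq_getElem_cons hklt
    have htake : full.take (k + 1) = full.take k ++ [full[k]] := by
      rw [List.take_add_one]
      simp [List.getElem?_eq_getElem hklt]
    have hfne : full ≠ [] := by intro h; rw [h] at hklt; simp at hklt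
    have htne : full.take (k + 1) ≠ [] := by simp [List.take_eq_nil_iff, hfne]
    have hpre : (psums full 0).getD k 0 - 5 = jlen (full.take (k + 1)) := by
      rw [psums_getD full 0 k hklt, jlen_eq_S _ htne]
      ring
    have hstep : jlen (full.take k) +
        (if full.take k = [] then PySem.Str.len full[k] else PySem.Str.len full[k] + 5)
        = jlen (full.take (k + 1)) := by
      rw [htake, jlen_append_singleton]
    have hpk : full[k] ≠ "" := hne _ (full.getElem_mem hklt)
    rw [hdrop, goK]
    simp only [joinA_go]
    rw [if_neg hpk]
    by_cases hc : jlen (full.take (k + 1)) > m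
    · have hcond : ¬ (k < full.length ∧ (psums full 0).getD k 0 - 5 ≤ m) := by
        rw [hpre]; omega
      rw [if_pos (by rw [hstep]; exact hc), if_neg hcond]
    · have hcond : k < full.length ∧ (psums full 0).getD k 0 - 5 ≤ m := by
        rw [hpre]; omega
      rw [if_neg (by rw [hstep]; exact hc), hstep, ← htake, if_pos hcond]
      exact ih (k + 1) (by omega) (by omega)

-- ===== VERDICT (by name: the statement is the Claim_ definition above) =====
theorem join_with_limit_spec : Claim_equal_join_with_limit := by
  intro parts max_chars _
  unfold Spec_join_with_limit join_with_limit join_with_limit_alt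
  rw [joinA_filter]
  have h := main_align max_chars (parts.filter (fun p => decide (p ≠ "")))
      (by intro p hp; exact of_decide_eq_true (List.mem_filter.mp hp).2)
      (parts.filter (fun p => decide (p ≠ ""))).length 0 (by omega) (by omega)
  simp only [List.drop_zero, List.take_zero, jlen_nil] at h
  simp only [goPre_eq, List.nil_append]
  rw [h]
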